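-- pv_equiv track=rewrite | github.com/ILoveAGoodCrisp/Foundry | io_scene_foundry/export/prepare_scene.py | set_bone_prefix_str
-- ===== SOURCE A (Python) =====
-- def set_bone_prefix_str(string):
--     name = string.lower()
--     keep_stripping = True
--     while keep_stripping:
--         if name.startswith(("frame ", "frame_")):
--             name = name[6:]
--         elif name.startswith(("bone ", "bone_")):
--             name = name[5:]
--         elif name.startswith(("bip ", "bip_")):
--             name = name[4:]
--         elif name.startswith(("b ", "b_")):
--             name = name[2:]
--         else:
--             keep_stripping = False
--
--     return f"b_{name.strip(' _')}"
-- ===== SOURCE B (Python) =====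
-- _TOKENS = ("frame", "bone", "bip", "b")
--
-- def set_bone_prefix_str(string):
--     chars = string.lower()
--     n = len(chars)
--     i = 0
--     advanced = True
--     while advanced:
--         advanced = False
--         for t in _TOKENS:
--             j = i + len(t)
--             if chars.startswith(t, i) and j < n and chars[j] in " _":
--                 i = j + 1
--                 advanced = True
--                 break
--     return "b_" + chars[i:].strip(" _")
-- ===== Notes on version B (the rewrite author's own statement) =====
-- stated objective: alternative
-- what changed: Replaces the while-loop of elif branches that repeatedly re-slices the string with a table-driven cursor scanner: a token table and one advancing index over the lowercased string, with a single final slice instead of one new string per stripped prefix.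
import Mathlib
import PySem

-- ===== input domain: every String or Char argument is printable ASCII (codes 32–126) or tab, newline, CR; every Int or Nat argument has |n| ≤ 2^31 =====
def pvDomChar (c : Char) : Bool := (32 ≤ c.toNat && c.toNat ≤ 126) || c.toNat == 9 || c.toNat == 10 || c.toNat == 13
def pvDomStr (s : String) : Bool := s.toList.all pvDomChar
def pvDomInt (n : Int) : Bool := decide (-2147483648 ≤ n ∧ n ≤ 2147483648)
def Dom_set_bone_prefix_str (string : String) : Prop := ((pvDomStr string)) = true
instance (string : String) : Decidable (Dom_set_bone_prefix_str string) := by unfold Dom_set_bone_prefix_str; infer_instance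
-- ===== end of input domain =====

-- B replaces A's elif chain of repeated string re-slicing by a table-driven index scanner
-- (token table + one advancing cursor, final single slice); objective: alternative structure, same result.

-- ===== PORT A =====
-- while loop: each branch strips a fixed-length prefix from `name`
def pvALoop (name : List Char) : List Char :=
  if PySem.Chars.startswith name "frame ".toList || PySem.Chars.startswith name "frame_".toList then
    pvALoop (PySem.List.slice name (some 6) none)
  else if PySem.Chars.startswith name "bone ".toList || PySem.Chars.startswith name "bone_".toList then
    pvALoop (PySem.List.slice name (some 5) none)
  else if PySem.Chars.startswith name "bip ".toList || PySem.Chars.startswith name "bip_".toList then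
    pvALoop (PySem.List.slice name (some 4) none)
  else if PySem.Chars.startswith name "b ".toList || PySem.Chars.startswith name "b_".toList then
    pvALoop (PySem.List.slice name (some 2) none)
  else name
termination_by name.length
decreasing_by
  all_goals
    rw [PySem.List.slice_from _ (by norm_num)]
    rename_i h
    rcases Bool.or_eq_true_iff.mp h with h' | h' <;>
      · have := List.IsPrefix.length_le ((PySem.Chars.startswith_iff _ _).mp h')
        simp at this ⊢ <;> omega

def set_bone_prefix_str (string : String) : String :=
  let name := PySem.Chars.lower string.toList
  String.ofList ("b_".toList ++ PySem.Chars.stripChars (pvALoop name) " _".toList)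

-- ===== PORT B =====
def pvTokens : List (List Char) := ["frame".toList, "bone".toList, "bip".toList, "b".toList]

-- `chars.startswith(t, i) and j < n and chars[j] in " _"` ported by hand (exact:
-- startswith at offset i is startswith of the drop, chars[j] with 0 ≤ j < n is chars[j]?)
def pvBCond (chars : List Char) (i : Nat) (t : List Char) : Bool :=
  let j := i + t.length
  PySem.Chars.startswith (chars.drop i) t && decide (j < chars.length) &&
    (chars[j]? == some ' ' || chars[j]? == some '_')

-- the inner `for t in _TOKENS: … break`: first matching token, new cursor position
def pvBMatch (chars : List Char) (i : Nat) : List (List Char) → Option Nat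
  | [] => none
  | t :: ts => if pvBCond chars i t then some (i + t.length + 1) else pvBMatch chars i ts

-- needed by the port's termination proof
theorem pvBMatch_some {chars : List Char} {i i' : Nat} {ts : List (List Char)}
    (h : pvBMatch chars i ts = some i') : i < i' ∧ i' ≤ chars.length := by
  induction ts with
  | nil => simp [pvBMatch] at h
  | cons t ts ih =>
    rw [pvBMatch] at h
    split at h
    · rename_i hc
      have hj : i + t.length < chars.length := by
        have := (Bool.and_eq_true_iff.mp (Bool.and_eq_true_iff.mp hc).1).2
        exact of_decide_eq_true this
      cases h
      omega
    · exact ih h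

-- the outer `while advanced` loop: advance the cursor until no token matches
def pvBLoop (chars : List Char) (i : Nat) : Nat :=
  match h : pvBMatch chars i pvTokens with
  | some i' => pvBLoop chars i'
  | none => i
termination_by chars.length - i
decreasing_by
  have := pvBMatch_some h
  omega

def set_bone_prefix_str_alt (string : String) : String :=
  let chars := PySem.Chars.lower string.toList
  let i := pvBLoop chars 0
  String.ofList ("b_".toList ++
    PySem.Chars.stripChars (PySem.List.slice chars (some (i : Int)) none) " _".toList)

-- ===== PRECONDITION & SPEC =====
def Spec_set_bone_prefix_str (string : String) (out : String) : Prop := out = set_bone_prefix_str_alt string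
instance (string : String) (out : String) : Decidable (Spec_set_bone_prefix_str string out) := by unfold Spec_set_bone_prefix_str; infer_instance

-- ===== CLAIM (what is proved, stated in full; the proofs are below) =====
def Claim_equal_set_bone_prefix_str : Prop := ∀ (string : String), Dom_set_bone_prefix_str string → Spec_set_bone_prefix_str string (set_bone_prefix_str string)

-- ===== LEMMAS AND PROOFS =====

-- "name starts with t followed by c" decomposed
theorem pv_prefix_snoc_iff (t : List Char) (c : Char) (l : List Char) :
    (t ++ [c]) <+: l ↔ t <+: l ∧ l[t.length]? = some c := by
  induction t generalizing l with
  | nil =>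
    cases l with
    | nil => simp
    | cons a l => simp [List.cons_prefix_cons, eq_comm]
  | cons a t ih =>
    cases l with
    | nil => simp
    | cons b l => simp [List.cons_prefix_cons, ih, and_assoc]

-- A's branch condition for a token equals B's condition at cursor i
theorem pv_cond_eq (chars : List Char) (i : Nat) (t : List Char) :
    (PySem.Chars.startswith (chars.drop i) (t ++ [' ']) ||
     PySem.Chars.startswith (chars.drop i) (t ++ ['_'])) = pvBCond chars i t := by
  have hg : (chars.drop i)[t.length]? = chars[i + t.length]? := by
    rw [List.getElem?_drop]
  by_cases hlt : i + t.length < chars.length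
  · apply Bool.eq_iff_iff.mpr
    simp only [pvBCond, Bool.or_eq_true, Bool.and_eq_true,
      PySem.Chars.startswith_iff, pv_prefix_snoc_iff, hg, decide_eq_true_eq,
      beq_iff_eq]
    constructor
    · rintro (⟨h1, h2⟩ | ⟨h1, h2⟩) <;> exact ⟨⟨h1, hlt⟩, by simp [h2]⟩
    · rintro ⟨⟨h1, _⟩, h2 | h2⟩ <;> simp_all
  · have : chars[i + t.length]? = none := by
      rw [List.getElem?_eq_none_iff]; omega
    apply Bool.eq_iff_iff.mpr
    simp only [pvBCond, Bool.or_eq_true, Bool.and_eq_true,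
      PySem.Chars.startswith_iff, pv_prefix_snoc_iff, hg, this, decide_eq_true_eq,
      beq_iff_eq]
    constructor
    · rintro (⟨_, h⟩ | ⟨_, h⟩) <;> cases h
    · rintro ⟨⟨_, h⟩, _⟩; omega

theorem pv_loop_eq (chars : List Char) (i : Nat) :
    pvALoop (chars.drop i) = chars.drop (pvBLoop chars i) := by
  rw [pvBLoop]
  have e1 := pv_cond_eq chars i "frame".toList
  have e2 := pv_cond_eq chars i "bone".toList
  have e3 := pv_cond_eq chars i "bip".toList
  have e4 := pv_cond_eq chars i "b".toList
  have l1 : "frame ".toList = "frame".toList ++ [' '] := by decide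
  have l1' : "frame_".toList = "frame".toList ++ ['_'] := by decide
  have l2 : "bone ".toList = "bone".toList ++ [' '] := by decide
  have l2' : "bone_".toList = "bone".toList ++ ['_'] := by decide
  have l3 : "bip ".toList = "bip".toList ++ [' '] := by decide
  have l3' : "bip_".toList = "bip".toList ++ ['_'] := by decide
  have l4 : "b ".toList = "b".toList ++ [' '] := by decide
  have l4' : "b_".toList = "b".toList ++ ['_'] := by decide
  split
  · rename_i i' hm
    have hstep := pvBMatch_some hm
    rw [pvALoop, l1, l1', l2, l2', l3, l3', l4, l4', e1, e2, e3, e4]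
    simp only [pvTokens, pvBMatch] at hm
    split at hm
    · -- frame
      rename_i h1
      injection hm with hm
      have hL : ("frame".toList).length = 5 := by decide
      rw [hL] at hm
      rw [if_pos h1, PySem.List.slice_from _ (by norm_num), List.drop_drop]
      have hidx : i + Int.toNat 6 = i' := by omega
      rw [hidx, pv_loop_eq chars i']
    · split at hm
      · -- bone
        rename_i h1 h2
        injection hm with hm
        have hL : ("bone".toList).length = 4 := by decide
        rw [hL] at hm
        rw [if_neg h1, if_pos h2, PySem.List.slice_from _ (by norm_num),
          List.drop_drop]
        have hidx : i + Int.toNat 5 = i' := by omega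
        rw [hidx, pv_loop_eq chars i']
      · split at hm
        · -- bip
          rename_i h1 h2 h3
          injection hm with hm
          have hL : ("bip".toList).length = 3 := by decide
          rw [hL] at hm
          rw [if_neg h1, if_neg h2, if_pos h3,
            PySem.List.slice_from _ (by norm_num), List.drop_drop]
          have hidx : i + Int.toNat 4 = i' := by omega
          rw [hidx, pv_loop_eq chars i']
        · split at hm
          · -- b
            rename_i h1 h2 h3 h4
            injection hm with hm
            have hL : ("b".toList).length = 1 := by decide
            rw [hL] at hm
            rw [if_neg h1, if_neg h2, if_neg h3,
              if_pos h4, PySem.List.slice_from _ (by norm_num), List.drop_drop]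
            have hidx : i + Int.toNat 2 = i' := by omega
            rw [hidx, pv_loop_eq chars i']
          · exact absurd hm (by simp)
  · rename_i hm
    simp only [pvBMatch, pvTokens] at hm
    rw [pvALoop, l1, l1', l2, l2', l3, l3', l4, l4', e1, e2, e3, e4]
    split_ifs at hm ⊢ <;> simp_all
termination_by chars.length - i
decreasing_by
  all_goals omega

-- ===== VERDICT (by name: the statement is the Claim_ definition above) =====
theorem set_bone_prefix_str_spec : Claim_equal_set_bone_prefix_str := by
  intro string _
  unfold Spec_set_bone_prefix_str set_bone_prefix_str set_bone_prefix_str_alt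
  dsimp only
  have h := pv_loop_eq (PySem.Chars.lower string.toList) 0
  simp only [List.drop_zero] at h
  rw [PySem.List.slice_from_natCast, ← h]
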